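-- pv_equiv track=rewrite | github.com/Marvan-IT/ADAPTIVE-LEARNER | backend/src/api/teaching_service.py | _fix_latex_backslashes
-- ===== SOURCE A (Python) =====
-- _JSON_SAFE_ESCAPES = frozenset('"\\/u')
--
-- _JSON_WHITESPACE = frozenset('nrt')
--
-- def _fix_latex_backslashes(raw: str) -> str:
--     """Escape unescaped backslashes in raw LLM JSON output, preserving LaTeX commands.
--
--     JSON structural escapes (\\", \\/, \\\\, \\uXXXX) and true whitespace escapes
--     (\\n, \\r, \\t not followed by a letter) are left as-is. Every other backslash
--     is doubled so that json.loads keeps it as a literal backslash (LaTeX command).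
--     """
--     out: list[str] = []
--     i = 0
--     while i < len(raw):
--         ch = raw[i]
--         if ch == '\\' and i + 1 < len(raw):
--             nxt = raw[i + 1]
--             if nxt == '\\':
--                 # Double backslash: LaTeX line-break (\\ &=) OR JSON-escaped single backslash (\\frac)
--                 after = raw[i + 2] if i + 2 < len(raw) else ''
--                 if after.isalpha():
--                     # \\command → keep as \\ so json.loads gives \command (e.g. \frac, \begin)
--                     out.append(ch)
--                     out.append(nxt)
--                     i += 2
--                 else:
--                     # LaTeX line break \\ followed by space/& — quadruple so json.loads gives \\ (LaTeX newline)
--                     out.append('\\\\')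
--                     out.append('\\\\')
--                     i += 2
--             elif nxt in _JSON_SAFE_ESCAPES:
--                 out.append(ch)
--                 out.append(nxt)
--                 i += 2
--             elif nxt in _JSON_WHITESPACE and (i + 2 >= len(raw) or not raw[i + 2].isalpha()):
--                 # Standalone \n \r \t — true JSON whitespace escape, not a LaTeX command
--                 out.append(ch)
--                 out.append(nxt)
--                 i += 2
--             else:
--                 # LaTeX command backslash (e.g. \text, \times, \nabla) — double-escape
--                 out.append('\\\\')
--                 i += 1
--         else:
--             out.append(ch)
--             i += 1
--     return ''.join(out)
-- ===== SOURCE B (Python) =====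
-- import re
--
-- _PATTERN = re.compile(
--     r'(\\\\(?=[A-Za-z]))'      # \\ before a letter: JSON-escaped LaTeX command, keep
--     r'|(\\\\)'                 # other \\: LaTeX line break, quadruple
--     r'|(\\["/u])'              # JSON structural escape, keep
--     r'|(\\[nrt](?![A-Za-z]))'  # standalone whitespace escape, keep
--     r'|\\(.)',                 # any other escaped char: double the backslash
--     re.DOTALL,
-- )
--
--
-- def _repl(m: re.Match) -> str:
--     if m.group(1) is not None:
--         return m.group(1)
--     if m.group(2) is not None:
--         return '\\\\' + '\\\\'
--     if m.group(3) is not None: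
--         return m.group(3)
--     if m.group(4) is not None:
--         return m.group(4)
--     return '\\\\' + m.group(5)
--
--
-- def _fix_latex_backslashes(raw: str) -> str:
--     return _PATTERN.sub(_repl, raw)
-- ===== Notes on version B (the rewrite author's own statement) =====
-- stated objective: idiomatic
-- what changed: Replaces A's hand-rolled while-loop with manual index arithmetic and char peeking by a single re.sub over an ordered regex alternation whose callback picks the replacement per matched group.
import Mathlib
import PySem

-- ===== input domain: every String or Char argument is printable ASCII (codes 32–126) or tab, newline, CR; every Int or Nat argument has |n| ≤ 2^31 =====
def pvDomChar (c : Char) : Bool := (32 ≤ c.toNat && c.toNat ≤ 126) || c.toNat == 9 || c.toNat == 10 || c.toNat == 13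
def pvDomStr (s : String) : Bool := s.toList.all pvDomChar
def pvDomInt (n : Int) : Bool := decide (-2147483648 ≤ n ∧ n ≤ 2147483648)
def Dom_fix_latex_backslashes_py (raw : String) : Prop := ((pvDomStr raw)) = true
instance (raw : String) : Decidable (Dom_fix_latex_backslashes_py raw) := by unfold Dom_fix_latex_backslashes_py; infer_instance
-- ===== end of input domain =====

-- B replaces A's hand-rolled index/peek loop with a single ordered-alternation regex
-- substitution (re.sub with a callback); same output, different structure (objective: idiomatic).


-- ===== PORT A =====
-- _JSON_SAFE_ESCAPES = frozenset('"\\/u'),  _JSON_WHITESPACE = frozenset('nrt')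
def jsonSafeEscapes : PySem.Set Char := PySem.Set.ofList ['"', '\\', '/', 'u']
def jsonWhitespace : PySem.Set Char := PySem.Set.ofList ['n', 'r', 't']

-- the while-loop of A: index i over s, accumulator out; raw[k] reads are guarded in A,
-- so List.getD with a dummy default is exact.  ''.isalpha() is False, hence the
-- 'i + 2 < len' guard around the isalpha test on 'after'.
def loopA (s : List Char) (i : Nat) (out : List Char) : List Char :=
  if _h : i < s.length then
    let ch := s.getD i ' '
    if ch = '\\' ∧ i + 1 < s.length then
      let nxt := s.getD (i + 1) ' '
      if nxt = '\\' then
        if (i + 2 < s.length) ∧ PySem.Chars.isalpha (s.getD (i + 2) ' ') then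
          loopA s (i + 2) (out ++ [ch, nxt])
        else
          loopA s (i + 2) (out ++ ['\\', '\\'] ++ ['\\', '\\'])
      else if nxt ∈ jsonSafeEscapes then
        loopA s (i + 2) (out ++ [ch, nxt])
      else if nxt ∈ jsonWhitespace ∧ (s.length ≤ i + 2 ∨ ¬ PySem.Chars.isalpha (s.getD (i + 2) ' ')) then
        loopA s (i + 2) (out ++ [ch, nxt])
      else
        loopA s (i + 1) (out ++ ['\\', '\\'])
    else
      loopA s (i + 1) (out ++ [ch])
  else out
termination_by s.length - i

def fix_latex_backslashes_py (raw : String) : String :=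
  String.ofList (loopA raw.toList 0 [])

-- ===== PORT B =====
-- B is a re.sub over an ordered alternation; there is no regex engine in Lean, so the
-- scan is ported by hand: the regex engine's leftmost scan trying the alternatives in
-- pattern order, exact for this pattern.  '[A-Za-z]' = isalpha on the ASCII domain.
def scanB : List Char → List Char
  | [] => []
  | '\\' :: rest =>
    match rest with
    | [] => ['\\']                                   -- no alternative matches a lone final backslash
    | '\\' :: tl =>                                  -- alternatives 1 and 2: '\\\\(?=[A-Za-z])' | '\\\\'
      if (tl.head?.map PySem.Chars.isalpha).getD false then
        '\\' :: '\\' :: scanB tl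
      else
        '\\' :: '\\' :: '\\' :: '\\' :: scanB tl
    | c :: tl =>
      if c = '"' ∨ c = '/' ∨ c = 'u' then            -- alternative 3: '\\["/u]'
        '\\' :: c :: scanB tl
      else if (c = 'n' ∨ c = 'r' ∨ c = 't') ∧ ¬ (tl.head?.map PySem.Chars.isalpha).getD false then
        '\\' :: c :: scanB tl                        -- alternative 4: '\\[nrt](?![A-Za-z])'
      else
        '\\' :: '\\' :: c :: scanB tl                -- catch-all: '\\(.)' → two backslashes + c
  | c :: rest => c :: scanB rest                     -- not a match start: copied through

def fix_latex_backslashes_py_alt (raw : String) : String :=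
  String.ofList (scanB raw.toList)

-- ===== PRECONDITION & SPEC =====
def Spec_fix_latex_backslashes_py (raw : String) (out : String) : Prop := out = fix_latex_backslashes_py_alt raw
instance (raw : String) (out : String) : Decidable (Spec_fix_latex_backslashes_py raw out) := by unfold Spec_fix_latex_backslashes_py; infer_instance

-- ===== CLAIM (what is proved, stated in full; the proofs are below) =====
def Claim_equal_fix_latex_backslashes_py : Prop := ∀ (raw : String), Dom_fix_latex_backslashes_py raw → Spec_fix_latex_backslashes_py raw (fix_latex_backslashes_py raw)

-- ===== LEMMAS AND PROOFS =====

lemma scanB_bs_bs (tl : List Char) :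
    scanB ('\\' :: '\\' :: tl) =
      if (tl.head?.map PySem.Chars.isalpha).getD false then '\\' :: '\\' :: scanB tl
      else '\\' :: '\\' :: '\\' :: '\\' :: scanB tl := rfl

lemma scanB_bs_c (c : Char) (tl : List Char) (hc : c ≠ '\\') :
    scanB ('\\' :: c :: tl) =
      if c = '"' ∨ c = '/' ∨ c = 'u' then '\\' :: c :: scanB tl
      else if (c = 'n' ∨ c = 'r' ∨ c = 't') ∧ ¬ (tl.head?.map PySem.Chars.isalpha).getD false then
        '\\' :: c :: scanB tl
      else '\\' :: '\\' :: c :: scanB tl := by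
  rw [scanB.eq_def]
  split
  · simp_all
  · rename_i h2
    injection h2 with _ h2
    subst h2
    split
    · rename_i heq; cases heq
    · rename_i heq
      injection heq with h3 h4
      exact absurd h3 hc
    · rename_i heq
      injection heq with h3 h4
      subst h3; subst h4
      rfl
  · rename_i hx heq
    injection heq with h1 _
    exact absurd h1.symm hx

lemma scanB_c (c : Char) (rest : List Char) (hc : c ≠ '\\') :
    scanB (c :: rest) = c :: scanB rest := by
  rw [scanB.eq_def]
  split
  · simp_all
  · rename_i h2
    injection h2 with h3 _
    exact absurd h3 hc
  · rename_i heq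
    injection heq with h1 h2
    subst h1; subst h2
    rfl

lemma loopA_eq_scanB (s : List Char) :
    ∀ n i out, s.length - i ≤ n → loopA s i out = out ++ scanB (s.drop i) := by
  intro n
  induction n with
  | zero =>
    intro i out h
    have hle : s.length ≤ i := by omega
    rw [loopA]
    simp [Nat.not_lt.mpr hle, List.drop_of_length_le hle, scanB]
  | succ n ih =>
    intro i out h
    rw [loopA]
    by_cases hi : i < s.length
    · have hdrop : s.drop i = s[i] :: s.drop (i + 1) := List.drop_eq_getElem_cons hi
      have hchi : s.getD i ' ' = s[i] := List.getD_eq_getElem s ' ' hi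
      simp only [hi, dif_pos, hchi]
      by_cases hbs : s[i] = '\\' ∧ i + 1 < s.length
      · obtain ⟨hch, hi1⟩ := hbs
        have hdrop1 : s.drop (i + 1) = s[i+1] :: s.drop (i + 2) := List.drop_eq_getElem_cons hi1
        have hnxt : s.getD (i + 1) ' ' = s[i+1] := List.getD_eq_getElem s ' ' hi1
        have hhead2 : (s.drop (i + 2)).head? = s[i+2]? := List.head?_drop
        have halpha : ((s.drop (i + 2)).head?.map PySem.Chars.isalpha).getD false
            = ((i + 2 < s.length) ∧ PySem.Chars.isalpha (s.getD (i + 2) ' ') : Bool) := by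
          rw [hhead2]
          by_cases h2 : i + 2 < s.length
          · simp [h2]
          · simp [h2]
        rw [if_pos ⟨hch, hi1⟩, hdrop, hdrop1, hch]
        by_cases hnbs : s[i+1] = '\\'
        · -- nxt == '\\'
          rw [hnxt, if_pos hnbs, hnbs, scanB_bs_bs, halpha]
          by_cases hal : (i + 2 < s.length) ∧ PySem.Chars.isalpha (s.getD (i + 2) ' ')
          · rw [if_pos hal, ih (i + 2) _ (by omega),
              if_pos (decide_eq_true hal)]
            simp
          · rw [if_neg hal, ih (i + 2) _ (by omega),
              if_neg (by simp only [decide_eq_true_eq]; exact hal)]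
            simp
        · rw [hnxt, if_neg hnbs, scanB_bs_c _ _ hnbs]
          by_cases hsafe : s[i+1] ∈ jsonSafeEscapes
          · have hcase : s[i+1] = '"' ∨ s[i+1] = '/' ∨ s[i+1] = 'u' := by
              have := hsafe
              simp [jsonSafeEscapes, PySem.Set.ofList] at this
              rcases this with h | h | h | h
              · exact Or.inl h
              · exact absurd h hnbs
              · exact Or.inr (Or.inl h)
              · exact Or.inr (Or.inr h)
            rw [if_pos hsafe, if_pos hcase, ih (i + 2) _ (by omega)]
            simp
          · have hne3 : ¬ (s[i+1] = '"' ∨ s[i+1] = '/' ∨ s[i+1] = 'u') := by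
              intro hc
              apply hsafe
              rcases hc with h | h | h <;> rw [h] <;> decide
            rw [if_neg hsafe, if_neg hne3]
            by_cases hws : s[i+1] ∈ jsonWhitespace ∧ (s.length ≤ i + 2 ∨ ¬ PySem.Chars.isalpha (s.getD (i + 2) ' '))
            · obtain ⟨hmem, hcond⟩ := hws
              have hcase : s[i+1] = 'n' ∨ s[i+1] = 'r' ∨ s[i+1] = 't' := by
                simpa [jsonWhitespace, PySem.Set.ofList] using hmem
              have hnal : ¬ ((s.drop (i + 2)).head?.map PySem.Chars.isalpha).getD false = true := by
                rw [halpha]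
                simp only [decide_eq_true_eq]
                rintro ⟨h2, ha⟩
                rcases hcond with h | h
                · omega
                · exact h ha
              rw [if_pos ⟨hmem, hcond⟩, if_pos ⟨hcase, hnal⟩, ih (i + 2) _ (by omega)]
              simp
            · have hne4 : ¬ ((s[i+1] = 'n' ∨ s[i+1] = 'r' ∨ s[i+1] = 't')
                  ∧ ¬ ((s.drop (i + 2)).head?.map PySem.Chars.isalpha).getD false = true) := by
                rintro ⟨hc, hna⟩
                apply hws
                constructor
                · simpa [jsonWhitespace, PySem.Set.ofList] using hc
                · rw [halpha] at hna
                  simp only [decide_eq_true_eq] at hna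
                  by_cases h2 : i + 2 < s.length
                  · right; intro ha; exact hna ⟨h2, ha⟩
                  · left; omega
              -- A advances by 1 and copies nxt on the next iteration; B's catch-all
              -- consumes both, emitting the same characters.
              rw [if_neg hws, if_neg hne4, ih (i + 1) _ (by omega), hdrop1,
                scanB_c _ _ hnbs]
              simp
      · rw [if_neg hbs, ih (i + 1) _ (by omega), hdrop]
        by_cases hch' : s[i] = '\\'
        · have hi1 : ¬ i + 1 < s.length := fun hx => hbs ⟨hch', hx⟩
          have hdrop1 : s.drop (i + 1) = [] := List.drop_of_length_le (by omega)
          rw [hch', hdrop1]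
          simp [scanB]
        · rw [scanB_c _ _ hch']
          simp
    · have hle : s.length ≤ i := by omega
      simp [Nat.not_lt.mpr hle, List.drop_of_length_le hle, scanB]

-- ===== VERDICT (by name: the statement is the Claim_ definition above) =====
theorem fix_latex_backslashes_py_spec : Claim_equal_fix_latex_backslashes_py := by
  intro raw _
  unfold Spec_fix_latex_backslashes_py fix_latex_backslashes_py fix_latex_backslashes_py_alt
  rw [loopA_eq_scanB raw.toList raw.toList.length 0 [] (by omega)]
  simp
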